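-- pv_equiv track=rewrite | github.com/nobbydoo80/axis-backend | axis/home/single_home_checklist.py | is_valid_choices
-- ===== SOURCE A (Python) =====
-- def is_valid_choices(choices):
--     formula = '"{choices}"'.format(choices=",".join(choices))
--     for choice in choices:
--         if not all(31 < ord(c) < 128 for c in choice):
--             return False
--             # bad_actors = [c for c in choice if ord(c) >= 128]
--             # raise IndexError("You need to provide a replace the characters %r with something in ASCII %s - Need to use reference list" % bad_actors, choice)
--         if "," in choice or '"' in choice:
--             return False
--             # raise IndexError("You cannot use a comma, or double-quote in any choice option %r - Need to use reference list" % choice)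
--     if len(formula) > 257:  # Tested the shit out this..
--         # See https://support.office.com/en-us/article/excel-specifications-and-limits-1672b34d-7043-467e-8e27-269d656771c3
--         return False
--         # log.warning("You need to provide a reference sheet and column when you have more than 257 chars you have %d %s", len(formula), choices)
--         # raise IndexError("You need to provide a reference sheet and column when you have more than 257 chars")
--     return True
-- ===== SOURCE B (Python) =====
-- def is_valid_choices(choices):
--     # Fused recursive single pass: carry the remaining length budget of the
--     # comma-joined body (257 - 2 quotes = 255) and stop as soon as it is
--     # exhausted or a bad character is seen.
--     return _check(choices, 255)
--
-- def _check(rest, budget):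
--     if budget < 0:
--         return False
--     if not rest:
--         return True
--     head = rest[0]
--     for c in head:
--         o = ord(c)
--         if o <= 31 or o >= 128 or c == ',' or c == '"':
--             return False
--     return _check(rest[1:], budget - len(head) - (1 if len(rest) > 1 else 0))
-- ===== Notes on version B (the rewrite author's own statement) =====
-- stated objective: alternative
-- what changed: Replaces A's staged design (a per-choice character-validation loop followed by a separate comma-joined formula length test) with one fused recursive pass that threads a remaining length budget through the list and terminates early when the budget is exhausted or a bad character appears; the two ASCII/forbidden-char branches are merged into one per-character condition.
import Mathlib
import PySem

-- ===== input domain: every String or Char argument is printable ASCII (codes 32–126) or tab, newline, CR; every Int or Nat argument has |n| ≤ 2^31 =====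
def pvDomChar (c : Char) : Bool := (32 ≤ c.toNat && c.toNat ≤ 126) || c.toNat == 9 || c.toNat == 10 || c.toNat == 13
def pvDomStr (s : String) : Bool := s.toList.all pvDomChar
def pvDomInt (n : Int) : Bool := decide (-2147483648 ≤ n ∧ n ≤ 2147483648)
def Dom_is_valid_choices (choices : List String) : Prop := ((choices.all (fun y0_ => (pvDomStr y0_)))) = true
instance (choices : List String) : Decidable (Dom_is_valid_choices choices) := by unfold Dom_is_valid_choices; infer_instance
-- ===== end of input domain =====

-- B fuses A's staged char-validation loop and separate formula-length check into one recursive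
-- pass threading a remaining length budget (objective: alternative, same cost).


-- ===== PORT A =====
-- 'for choice in choices: … return False' — the early-return loop, one equation per Python branch
def pvLoopA : List String → Bool
  | [] => true
  | choice :: rest =>
    if !(choice.toList.all fun c => decide (31 < c.toNat) && decide (c.toNat < 128)) then false
    else if PySem.Str.isIn "," choice || PySem.Str.isIn "\"" choice then false
    else pvLoopA rest

def is_valid_choices (choices : List String) : Bool :=
  let formula : List Char := ['"'] ++ PySem.Chars.join [','] (choices.map String.toList) ++ ['"']
  if pvLoopA choices = false then false
  else if decide (PySem.Chars.len formula > 257) then false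
  else true

-- ===== PORT B =====
-- Source B's _check: recursive, budget of remaining joined length, early exit
def pvCheckB : List String → Int → Bool
  | rest, budget =>
    if budget < 0 then false
    else match rest with
      | [] => true
      | head :: tail =>
        -- the for-loop with early 'return False' on a bad char = all chars pass the merged test
        if head.toList.all (fun c =>
            !(decide (c.toNat ≤ 31) || decide (128 ≤ c.toNat) || c == ',' || c == '"')) then
          pvCheckB tail (budget - (head.toList.length : Int) - (if tail ≠ [] then 1 else 0))
        else false

def is_valid_choices_alt (choices : List String) : Bool :=
  pvCheckB choices 255

-- ===== PRECONDITION & SPEC =====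
def Spec_is_valid_choices (choices : List String) (out : Bool) : Prop := out = is_valid_choices_alt choices
instance (choices : List String) (out : Bool) : Decidable (Spec_is_valid_choices choices out) := by unfold Spec_is_valid_choices; infer_instance

-- ===== CLAIM (what is proved, stated in full; the proofs are below) =====
def Claim_equal_is_valid_choices : Prop := ∀ (choices : List String), Dom_is_valid_choices choices → Spec_is_valid_choices choices (is_valid_choices choices)

-- ===== LEMMAS AND PROOFS =====

theorem comma_toList : (",").toList = [','] := by decide
theorem quote_toList : ("\"").toList = ['"'] := by decide

theorem isIn_single_false_iff (a : Char) (s : List Char) :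
    PySem.Chars.isIn [a] s = false ↔ a ∉ s := by
  rw [PySem.Chars.isIn_eq_false_iff]; simp [List.singleton_infix_iff]

-- B's merged per-character test, per choice
def pvOkB (s : String) : Bool :=
  s.toList.all (fun c =>
    !(decide (c.toNat ≤ 31) || decide (128 ≤ c.toNat) || c == ',' || c == '"'))

-- A's per-choice pair of tests equals B's merged per-choice test
theorem perA_eq (choice : String) :
    ((choice.toList.all fun c => decide (31 < c.toNat) && decide (c.toNat < 128))
      && !(PySem.Str.isIn "," choice || PySem.Str.isIn "\"" choice)) = pvOkB choice := by
  rw [Bool.eq_iff_iff]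
  simp only [pvOkB, Bool.and_eq_true, List.all_eq_true, Bool.not_eq_true',
    Bool.or_eq_false_iff, PySem.Str.isIn_eq, comma_toList, quote_toList,
    isIn_single_false_iff, decide_eq_true_eq, decide_eq_false_iff_not,
    beq_eq_false_iff_ne, ne_eq, not_le]
  constructor
  · rintro ⟨h1, h2, h3⟩ c hc
    exact ⟨⟨h1 c hc, fun h => h2 (h ▸ hc)⟩, fun h => h3 (h ▸ hc)⟩
  · intro h
    refine ⟨fun c hc => (h c hc).1.1, fun hc => (h _ hc).1.2 rfl, fun hc => (h _ hc).2 rfl⟩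

-- A's early-return loop is the conjunction of B's merged per-choice tests
theorem pvLoopA_eq (choices : List String) :
    pvLoopA choices = choices.all pvOkB := by
  induction choices with
  | nil => rfl
  | cons choice rest ih =>
    rw [List.all_cons, ← perA_eq, ← ih]
    simp only [pvLoopA]
    split_ifs with h1 h2 <;> simp_all
    intro ha hb
    rcases h2 with h | h <;> simp_all

theorem intercalate_comma_cons (h : List Char) (t : List (List Char)) :
    (List.intercalate [','] (h :: t)).length
      = h.length + (if t = [] then 0 else 1) + (List.intercalate [','] t).length := by
  cases t with
  | nil => simp [List.intercalate]
  | cons b t' => simp [List.intercalate, List.intersperse]; omega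

-- B's recursion computes 'budget nonnegative ∧ all choices ok ∧ joined length ≤ budget'
theorem pvCheckB_eq (rest : List String) : ∀ (budget : Int),
    pvCheckB rest budget
      = (decide (0 ≤ budget) && rest.all pvOkB
         && decide (((List.intercalate [','] (rest.map String.toList)).length : Int) ≤ budget)) := by
  induction rest with
  | nil =>
    intro budget
    rw [pvCheckB]
    split_ifs with h
    · rw [decide_eq_false (by omega : ¬ (0:Int) ≤ budget)]; simp
    · rw [decide_eq_true (by omega : (0:Int) ≤ budget)]
      simp [List.intercalate]; omega
  | cons head tail ih =>
    intro budget
    rw [pvCheckB]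
    have hlen : (0:Int) ≤ ((List.intercalate [','] (tail.map String.toList)).length : Int) :=
      Int.natCast_nonneg _
    split_ifs with h hok htail
    · rw [decide_eq_false (by omega : ¬ (0:Int) ≤ budget)]; simp
    · -- budget ≥ 0, head ok, tail ≠ []
      have hok' : pvOkB head = true := hok
      have hne : tail.map String.toList ≠ [] := by simpa using htail
      rw [ih]
      simp only [List.all_cons, hok', Bool.true_and, List.map_cons, intercalate_comma_cons,
        if_neg hne]
      rw [Bool.eq_iff_iff]
      simp only [Bool.and_eq_true, decide_eq_true_eq]
      push_cast
      constructor
      · rintro ⟨⟨h2, h3⟩, h4⟩; exact ⟨⟨by omega, h3⟩, by omega⟩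
      · rintro ⟨⟨h2, h3⟩, h4⟩; exact ⟨⟨by omega, h3⟩, by omega⟩
    · -- budget ≥ 0, head ok, tail = []
      have hok' : pvOkB head = true := hok
      have ht : tail = [] := not_not.mp htail
      subst ht
      rw [ih]
      simp only [List.all_cons, List.all_nil, hok', Bool.and_true,
        List.map_cons, List.map_nil, List.intercalate, List.intersperse, List.flatten,
        List.length_nil]
      rw [Bool.eq_iff_iff]
      simp only [Bool.and_eq_true, decide_eq_true_eq]
      have he : (head.toList.append []).length = head.toList.length := by simp
      rw [he]
      push_cast
      omega
    · -- bad char in head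
      have hok' : pvOkB head = false := by
        exact Bool.not_eq_true _ ▸ (by simpa [pvOkB] using hok)
      simp [List.all_cons, hok']

theorem main_eq (choices : List String) :
    is_valid_choices choices = is_valid_choices_alt choices := by
  unfold is_valid_choices is_valid_choices_alt
  rw [pvCheckB_eq]
  simp only [PySem.Chars.join, pvLoopA_eq, PySem.Chars.len_eq, gt_iff_lt,
    List.length_append, List.length_cons, List.length_nil]
  cases hok : choices.all pvOkB with
  | false => simp
  | true =>
    simp only [Bool.and_true, if_neg (by simp : ¬ (true = false))]
    have hT : decide ((0:Int) ≤ 255) = true := by decide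
    rw [hT, Bool.true_and]
    rw [Bool.eq_iff_iff]
    split_ifs with h1 <;> simp_all <;> omega

-- ===== VERDICT (by name: the statement is the Claim_ definition above) =====
theorem is_valid_choices_spec : Claim_equal_is_valid_choices := by
  intro choices _
  unfold Spec_is_valid_choices
  exact main_eq choices
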